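-- pv_equiv track=rewrite | github.com/hklie/scrabble | scrabble/duplicate/engine.py | _get_blank_offsets_from_input
-- ===== SOURCE A (Python) =====
-- def _get_blank_offsets_from_input(play_word, word_display):
--     """Return set of character offsets where the player used lowercase (blank).
--
--     play_word preserves case (e.g. 'CORTEs'), word_display is all-upper (e.g. 'CORTES').
--     We walk both strings in sync, handling digraphs in word_display (CH, LL, RR).
--     Returns a set of offsets into word_display, or None if letters don't match.
--     """
--     digraphs = {'CH', 'LL', 'RR'}
--     blank_offsets = set()
--     pi = 0  # index into play_word
--     di = 0  # index into word_display
--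
--     while di < len(word_display) and pi < len(play_word):
--         # Check if word_display has a digraph at this position
--         dg = word_display[di:di+2]
--         if dg in digraphs:
--             # Player should have typed 2 chars for this digraph
--             if pi + 1 >= len(play_word):
--                 return None
--             p_chunk = play_word[pi:pi+2]
--             if p_chunk.upper() != dg:
--                 return None
--             # Both chars of digraph must be same case (both lower = blank)
--             if p_chunk[0].islower() and p_chunk[1].islower():
--                 blank_offsets.add(di)
--             elif p_chunk[0].isupper() and p_chunk[1].isupper():
--                 pass  # regular tile
--             else:
--                 return None  # mixed case within digraph is invalid
--             di += 2
--             pi += 2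
--         else:
--             p_ch = play_word[pi]
--             if p_ch.upper() != word_display[di]:
--                 return None
--             if p_ch.islower():
--                 blank_offsets.add(di)
--             di += 1
--             pi += 1
--
--     if di != len(word_display) or pi != len(play_word):
--         return None
--     return blank_offsets
-- ===== SOURCE B (Python) =====
-- def _tokens(word_display):
--     """Split word_display into (offset, chunk) tokens, chunk a digraph or one char."""
--     toks = []
--     i = 0
--     n = len(word_display)
--     while i < n:
--         if word_display[i:i+2] in ('CH', 'LL', 'RR'):
--             toks.append((i, word_display[i:i+2]))
--             i += 2
--         else:
--             toks.append((i, word_display[i]))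
--             i += 1
--     return toks
--
--
-- def _get_blank_offsets_from_input(play_word, word_display):
--     blanks = set()
--     rest = play_word
--     for off, chunk in _tokens(word_display):
--         if len(chunk) == 2:
--             if len(rest) < 2:
--                 return None
--             p1, p2 = rest[0], rest[1]
--             rest = rest[2:]
--             if p1.upper() != chunk[0] or p2.upper() != chunk[1]:
--                 return None
--             if p1.islower() and p2.islower():
--                 blanks.add(off)
--             elif not (p1.isupper() and p2.isupper()):
--                 return None
--         else:
--             if not rest:
--                 return None
--             p = rest[0]
--             rest = rest[1:]
--             if p.upper() != chunk:
--                 return None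
--             if p.islower():
--                 blanks.add(off)
--     if rest:
--         return None
--     return blanks
-- ===== Notes on version B (the rewrite author's own statement) =====
-- stated objective: alternative
-- what changed: Replaces A's single synchronized two-pointer walk over both strings with a two-phase decomposition: first tokenize word_display into (offset, digraph-or-char) tokens, then a separate pass consumes play_word token by token.
import Mathlib
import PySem

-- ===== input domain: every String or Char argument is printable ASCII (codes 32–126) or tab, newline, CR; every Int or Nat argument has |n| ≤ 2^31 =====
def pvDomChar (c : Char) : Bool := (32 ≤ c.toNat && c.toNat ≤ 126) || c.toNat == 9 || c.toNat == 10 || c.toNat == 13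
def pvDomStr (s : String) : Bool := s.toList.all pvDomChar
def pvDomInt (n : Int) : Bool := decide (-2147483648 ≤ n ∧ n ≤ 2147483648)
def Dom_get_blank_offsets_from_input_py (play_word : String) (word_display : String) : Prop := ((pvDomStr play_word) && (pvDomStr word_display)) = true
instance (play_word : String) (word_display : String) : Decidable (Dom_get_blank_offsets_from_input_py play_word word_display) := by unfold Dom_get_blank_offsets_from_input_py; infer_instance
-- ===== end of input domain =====

-- B re-decomposes A's single synced walk as tokenize-word_display-then-consume-play_word (objective: alternative); same return value everywhere.

-- shared: 'word_display[i:i+2] in {"CH","LL","RR"}' given the two chars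
def pvIsDigraph (c1 c2 : Char) : Bool :=
  (c1 == 'C' && c2 == 'H') || (c1 == 'L' && c2 == 'L') || (c1 == 'R' && c2 == 'R')

-- ===== PORT A =====
-- the while loop: pw/dw are the unconsumed suffixes of play_word/word_display, di the offset, acc = blank_offsets
def pvGoA : List Char → List Char → Int → List Int → Option (List Int)
  | [], [], _, acc => some acc                 -- di == len(word_display) and pi == len(play_word)
  | [], _ :: _, _, _ => none                   -- one string exhausted before the other
  | _ :: _, [], _, _ => none
  | p1 :: ps, d1 :: d2 :: ds, di, acc =>
      if pvIsDigraph d1 d2 then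
        match ps with
        | [] => none                           -- pi + 1 >= len(play_word)
        | p2 :: ps' =>
          if PySem.Chars.upperChar p1 == d1 && PySem.Chars.upperChar p2 == d2 then
            if PySem.Chars.islower p1 && PySem.Chars.islower p2 then
              pvGoA ps' ds (di + 2) (PySem.Set.add acc di)
            else if PySem.Chars.isupper p1 && PySem.Chars.isupper p2 then
              pvGoA ps' ds (di + 2) acc
            else none                          -- mixed case within digraph
          else none                            -- p_chunk.upper() != dg
      else
        if PySem.Chars.upperChar p1 == d1 then
          pvGoA ps (d2 :: ds) (di + 1) (if PySem.Chars.islower p1 then PySem.Set.add acc di else acc)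
        else none
  | p1 :: ps, [d1], di, acc =>                 -- last display char: slice dg has length 1, never a digraph
      if PySem.Chars.upperChar p1 == d1 then
        pvGoA ps [] (di + 1) (if PySem.Chars.islower p1 then PySem.Set.add acc di else acc)
      else none

def get_blank_offsets_from_input_py (play_word : String) (word_display : String) : Option (List Int) :=
  pvGoA play_word.toList word_display.toList 0 PySem.Set.empty

-- ===== PORT B =====
-- B's _tokens: split word_display into (offset, chunk) tokens
def pvTokens : List Char → Int → List (Int × List Char)
  | c1 :: c2 :: rest, i =>
      if pvIsDigraph c1 c2 then (i, [c1, c2]) :: pvTokens rest (i + 2)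
      else (i, [c1]) :: pvTokens (c2 :: rest) (i + 1)
  | [c], i => [(i, [c])]
  | [], _ => []

-- B's main loop: consume the tokens, 'rest' the unconsumed suffix of play_word, blanks the set
def pvConsume : List (Int × List Char) → List Char → List Int → Option (List Int)
  | [], rest, blanks => if rest.isEmpty then some blanks else none
  | (off, [c1, c2]) :: toks, rest, blanks =>
      match rest with
      | p1 :: p2 :: rest' =>
        if PySem.Chars.upperChar p1 == c1 && PySem.Chars.upperChar p2 == c2 then
          if PySem.Chars.islower p1 && PySem.Chars.islower p2 then
            pvConsume toks rest' (PySem.Set.add blanks off)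
          else if PySem.Chars.isupper p1 && PySem.Chars.isupper p2 then
            pvConsume toks rest' blanks
          else none
        else none
      | _ => none                              -- len(rest) < 2
  | (off, [c]) :: toks, rest, blanks =>
      match rest with
      | p :: rest' =>
        if PySem.Chars.upperChar p == c then
          pvConsume toks rest' (if PySem.Chars.islower p then PySem.Set.add blanks off else blanks)
        else none
      | [] => none
  | (_, _) :: _, _, _ => none                  -- unreachable: tokens are 1 or 2 chars

def get_blank_offsets_from_input_py_alt (play_word : String) (word_display : String) : Option (List Int) :=
  pvConsume (pvTokens word_display.toList 0) play_word.toList PySem.Set.empty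

-- ===== PRECONDITION & SPEC =====
def Spec_get_blank_offsets_from_input_py (play_word : String) (word_display : String) (out : Option (List Int)) : Prop := out = get_blank_offsets_from_input_py_alt play_word word_display
instance (play_word : String) (word_display : String) (out : Option (List Int)) : Decidable (Spec_get_blank_offsets_from_input_py play_word word_display out) := by unfold Spec_get_blank_offsets_from_input_py; infer_instance

-- ===== CLAIM (what is proved, stated in full; the proofs are below) =====
def Claim_equal_get_blank_offsets_from_input_py : Prop := ∀ (play_word : String) (word_display : String), Dom_get_blank_offsets_from_input_py play_word word_display → Spec_get_blank_offsets_from_input_py play_word word_display (get_blank_offsets_from_input_py play_word word_display)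

-- ===== LEMMAS AND PROOFS =====

theorem pvConsume_tokens (dw : List Char) : ∀ (i : Int) (pw : List Char) (acc : List Int),
    pvConsume (pvTokens dw i) pw acc = pvGoA pw dw i acc := by
  induction dw, (0 : Int) using pvTokens.induct with
  | case1 c1 c2 rest i hdg ih =>
    intro i pw acc
    match pw with
    | [] => simp [pvTokens, hdg, pvConsume, pvGoA]
    | [p1] => simp [pvTokens, hdg, pvConsume, pvGoA]
    | p1 :: p2 :: ps =>
      simp only [pvTokens, if_pos hdg]
      simp only [pvConsume, pvGoA, if_pos hdg]
      split_ifs <;> first | rfl | exact ih _ _ _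
  | case2 c1 c2 rest i hdg ih =>
    intro i pw acc
    match pw with
    | [] => simp [pvTokens, hdg, pvConsume, pvGoA]
    | [p1] =>
      simp only [pvTokens, if_neg hdg]
      simp only [pvConsume, pvGoA, if_neg hdg]
      split_ifs <;> first | rfl | exact ih _ _ _
    | p1 :: p2 :: ps =>
      simp only [pvTokens, if_neg hdg]
      simp only [pvConsume, pvGoA, if_neg hdg]
      split_ifs <;> first | rfl | exact ih _ _ _
  | case3 c i =>
    intro i pw acc
    match pw with
    | [] => simp [pvTokens, pvConsume, pvGoA]
    | p1 :: ps =>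
      simp only [pvTokens, pvConsume, pvGoA]
      by_cases h : (PySem.Chars.upperChar p1 == c) = true
      · simp only [h, if_true]
        cases ps <;> simp [pvGoA]
      · simp [h]
  | case4 i =>
    intro i pw acc
    cases pw <;> simp [pvTokens, pvConsume, pvGoA, List.isEmpty]

-- ===== VERDICT (by name: the statement is the Claim_ definition above) =====
theorem get_blank_offsets_from_input_py_spec : Claim_equal_get_blank_offsets_from_input_py := by
  intro pw dw _
  unfold Spec_get_blank_offsets_from_input_py get_blank_offsets_from_input_py get_blank_offsets_from_input_py_alt
  rw [pvConsume_tokens]
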